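-- pv_equiv track=rewrite | github.com/Frashmeat/AgentForSTS2 | backend/app/modules/knowledge/infra/knowledge_runtime.py | _knowledge_pack_file_stats
-- ===== SOURCE A (Python) =====
-- def _knowledge_pack_file_stats(files: list[str]) -> dict[str, int]:
--     return {
--         "resource_md_count": sum(
--             1 for path in files if path.startswith("resources/sts2/") and path.lower().endswith(".md")
--         ),
--         "game_cs_count": sum(1 for path in files if path.startswith("game/") and path.lower().endswith(".cs")),
--         "baselib_cs_count": sum(1 for path in files if path.startswith("baselib/") and path.lower().endswith(".cs")),
--     }
-- ===== SOURCE B (Python) =====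
-- def _knowledge_pack_file_stats(files: list[str]) -> dict[str, int]:
--     resource_md = game_cs = baselib_cs = 0
--     for path in files:
--         if path.startswith("resources/sts2/") and path.lower().endswith(".md"):
--             resource_md += 1
--         elif path.startswith("game/") and path.lower().endswith(".cs"):
--             game_cs += 1
--         elif path.startswith("baselib/") and path.lower().endswith(".cs"):
--             baselib_cs += 1
--     return {
--         "resource_md_count": resource_md,
--         "game_cs_count": game_cs,
--         "baselib_cs_count": baselib_cs,
--     }
-- ===== Notes on version B (the rewrite author's own statement) =====
-- stated objective: simpler
-- what changed: Replaces three separate generator-expression passes over the list with a single for-loop maintaining three counters and an if/elif chain (valid because the three prefixes are mutually exclusive).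
import Mathlib
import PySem

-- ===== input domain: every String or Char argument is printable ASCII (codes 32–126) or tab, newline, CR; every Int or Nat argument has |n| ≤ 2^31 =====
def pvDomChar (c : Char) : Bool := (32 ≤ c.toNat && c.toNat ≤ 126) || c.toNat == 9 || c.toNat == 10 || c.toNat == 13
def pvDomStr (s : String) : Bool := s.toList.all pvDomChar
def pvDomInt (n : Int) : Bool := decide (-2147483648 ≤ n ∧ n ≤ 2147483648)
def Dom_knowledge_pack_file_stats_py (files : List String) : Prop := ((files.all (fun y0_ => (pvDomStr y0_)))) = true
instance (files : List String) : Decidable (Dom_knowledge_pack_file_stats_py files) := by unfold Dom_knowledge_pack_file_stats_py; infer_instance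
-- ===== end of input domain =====

-- B replaces A's three separate counting passes with one loop and three counters (if/elif),
-- which is correct because the three path prefixes are mutually exclusive; objective: simpler.


-- ===== PORT A =====
-- path.startswith("resources/sts2/") and path.lower().endswith(".md")
def pvIsResourceMd (path : String) : Bool :=
  PySem.Str.startswith path "resources/sts2/" && PySem.Str.endswith (PySem.Str.lower path) ".md"

-- path.startswith("game/") and path.lower().endswith(".cs")
def pvIsGameCs (path : String) : Bool :=
  PySem.Str.startswith path "game/" && PySem.Str.endswith (PySem.Str.lower path) ".cs"

-- path.startswith("baselib/") and path.lower().endswith(".cs")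
def pvIsBaselibCs (path : String) : Bool :=
  PySem.Str.startswith path "baselib/" && PySem.Str.endswith (PySem.Str.lower path) ".cs"

-- sum(1 for path in files if pred(path))
def pvSumIf (pred : String → Bool) (files : List String) : Int :=
  files.foldl (fun acc path => if pred path then acc + 1 else acc) 0

def knowledge_pack_file_stats_py (files : List String) : List (String × Int) :=
  [("resource_md_count", pvSumIf pvIsResourceMd files),
   ("game_cs_count", pvSumIf pvIsGameCs files),
   ("baselib_cs_count", pvSumIf pvIsBaselibCs files)]

-- ===== PORT B =====
-- single loop over files maintaining the three counters (if/elif chain)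
def pvLoopB (files : List String) (st : Int × Int × Int) : Int × Int × Int :=
  files.foldl
    (fun st path =>
      if pvIsResourceMd path then (st.1 + 1, st.2.1, st.2.2)
      else if pvIsGameCs path then (st.1, st.2.1 + 1, st.2.2)
      else if pvIsBaselibCs path then (st.1, st.2.1, st.2.2 + 1)
      else st)
    st

def knowledge_pack_file_stats_py_alt (files : List String) : List (String × Int) :=
  let st := pvLoopB files (0, 0, 0)
  [("resource_md_count", st.1),
   ("game_cs_count", st.2.1),
   ("baselib_cs_count", st.2.2)]

-- ===== PRECONDITION & SPEC =====
def Spec_knowledge_pack_file_stats_py (files : List String) (out : List (String × Int)) : Prop := out = knowledge_pack_file_stats_py_alt files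
instance (files : List String) (out : List (String × Int)) : Decidable (Spec_knowledge_pack_file_stats_py files out) := by unfold Spec_knowledge_pack_file_stats_py; infer_instance

-- ===== CLAIM (what is proved, stated in full; the proofs are below) =====
def Claim_equal_knowledge_pack_file_stats_py : Prop := ∀ (files : List String), Dom_knowledge_pack_file_stats_py files → Spec_knowledge_pack_file_stats_py files (knowledge_pack_file_stats_py files)

-- ===== LEMMAS AND PROOFS =====

-- a true startswith pins down the first character of the path
theorem pvStart_head {path pre : String} {c : Char} (hc : pre.toList.head? = some c)
    (h : PySem.Str.startswith path pre = true) : path.toList.head? = some c := by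
  have hpfx : pre.toList <+: path.toList :=
    (PySem.Chars.startswith_iff path.toList pre.toList).mp (by simpa using h)
  rcases hpfx with ⟨r, hr⟩
  cases hl : pre.toList with
  | nil => rw [hl] at hc; simp at hc
  | cons d t =>
    rw [hl] at hc hr
    simp at hc
    rw [← hr]; simp [hc]

theorem pvMd_not_game {path : String} (h : pvIsResourceMd path = true) : pvIsGameCs path = false := by
  unfold pvIsResourceMd at h
  unfold pvIsGameCs
  simp only [Bool.and_eq_true] at h
  simp only [Bool.and_eq_false_iff]
  left
  by_contra hb
  simp only [Bool.not_eq_false] at hb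
  have h1 := pvStart_head (pre := "resources/sts2/") (c := 'r') (by decide) h.1
  have h2 := pvStart_head (pre := "game/") (c := 'g') (by decide) hb
  rw [h1] at h2; simp at h2

theorem pvMd_not_baselib {path : String} (h : pvIsResourceMd path = true) : pvIsBaselibCs path = false := by
  unfold pvIsResourceMd at h
  unfold pvIsBaselibCs
  simp only [Bool.and_eq_true] at h
  simp only [Bool.and_eq_false_iff]
  left
  by_contra hb
  simp only [Bool.not_eq_false] at hb
  have h1 := pvStart_head (pre := "resources/sts2/") (c := 'r') (by decide) h.1
  have h2 := pvStart_head (pre := "baselib/") (c := 'b') (by decide) hb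
  rw [h1] at h2; simp at h2

theorem pvGame_not_baselib {path : String} (h : pvIsGameCs path = true) : pvIsBaselibCs path = false := by
  unfold pvIsGameCs at h
  unfold pvIsBaselibCs
  simp only [Bool.and_eq_true] at h
  simp only [Bool.and_eq_false_iff]
  left
  by_contra hb
  simp only [Bool.not_eq_false] at hb
  have h1 := pvStart_head (pre := "game/") (c := 'g') (by decide) h.1
  have h2 := pvStart_head (pre := "baselib/") (c := 'b') (by decide) hb
  rw [h1] at h2; simp at h2

-- the counting fold started at z equals z plus the fold started at 0
theorem pvSumIf_shift (pred : String → Bool) (t : List String) : ∀ z : Int,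
    t.foldl (fun acc path => if pred path then acc + 1 else acc) z =
      z + t.foldl (fun acc path => if pred path then acc + 1 else acc) 0 := by
  induction t with
  | nil => intro z; simp
  | cons q r ih =>
    intro z
    simp only [List.foldl_cons]
    by_cases hq : pred q = true
    · simp only [hq, if_true]
      rw [ih (z + 1), ih (0 + 1)]; ring
    · simp only [hq, if_false, Bool.false_eq_true]
      exact ih z

theorem pvSumIf_cons (pred : String → Bool) (p : String) (t : List String) :
    pvSumIf pred (p :: t) = (if pred p then (1:Int) else 0) + pvSumIf pred t := by
  unfold pvSumIf
  simp only [List.foldl_cons]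
  by_cases hp : pred p = true
  · simp only [hp, if_true]
    rw [pvSumIf_shift pred t (0 + 1)]; ring
  · simp only [hp, if_false, Bool.false_eq_true]
    simp

-- B's single fold computes the three independent sums of A
theorem pvLoop_eq (files : List String) : ∀ a b c : Int,
    pvLoopB files (a, b, c) =
      (a + pvSumIf pvIsResourceMd files, b + pvSumIf pvIsGameCs files, c + pvSumIf pvIsBaselibCs files) := by
  induction files with
  | nil => intro a b c; simp [pvLoopB, pvSumIf]
  | cons p t ih =>
    intro a b c
    rw [pvSumIf_cons, pvSumIf_cons, pvSumIf_cons]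
    simp only [pvLoopB, List.foldl_cons] at *
    by_cases h1 : pvIsResourceMd p = true
    · simp only [h1, if_true]
      rw [ih (a+1) b c, pvMd_not_game h1, pvMd_not_baselib h1]
      simp only [Prod.mk.injEq, Bool.false_eq_true, if_false]
      refine ⟨by ring, by ring, by ring⟩
    · by_cases h2 : pvIsGameCs p = true
      · simp only [h1, h2, if_true, Bool.false_eq_true, if_false]
        rw [ih a (b+1) c, pvGame_not_baselib h2]
        simp only [Prod.mk.injEq, Bool.false_eq_true, if_false]
        refine ⟨by ring, by ring, by ring⟩
      · by_cases h3 : pvIsBaselibCs p = true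
        · simp only [h1, h2, h3, if_true, Bool.false_eq_true, if_false]
          rw [ih a b (c+1)]
          simp only [Prod.mk.injEq]
          refine ⟨by ring, by ring, by ring⟩
        · simp only [h1, h2, h3, Bool.false_eq_true, if_false]
          rw [ih a b c]
          simp only [Prod.mk.injEq]
          refine ⟨by ring, by ring, by ring⟩

-- ===== VERDICT (by name: the statement is the Claim_ definition above) =====
theorem knowledge_pack_file_stats_py_spec : Claim_equal_knowledge_pack_file_stats_py := by
  intro files _
  unfold Spec_knowledge_pack_file_stats_py knowledge_pack_file_stats_py knowledge_pack_file_stats_py_alt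
  rw [pvLoop_eq files 0 0 0]
  simp
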